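-- pv_equiv track=rewrite | github.com/takaria0/initbinder | export_files.py | detect_internal_restriction_sites
-- ===== SOURCE A (Python) =====
-- from typing import Callable, Dict, List, Optional, Tuple
--
-- RESTRICTION_SITES: Dict[str, Tuple[str, ...]] = {
--     "BsaI": ("GGTCTC", "GAGACC"),
--     "ScaI": ("AGTACT",),
-- }
--
-- def detect_internal_restriction_sites(dna_full: str, prefix_len: int, core_len: int) -> List[Tuple[str, str, int]]:
--     """Return list of (enzyme, motif, start_index) for sites outside adapters."""
--     dna_upper = dna_full.upper()
--     hits: List[Tuple[str, str, int]] = []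
--     suffix_start = prefix_len + core_len
--     for enzyme, motifs in RESTRICTION_SITES.items():
--         for motif in motifs:
--             motif_upper = motif.upper()
--             start = dna_upper.find(motif_upper)
--             while start != -1:
--                 end = start + len(motif_upper)
--                 in_prefix = end <= prefix_len
--                 in_suffix = start >= suffix_start
--                 if not in_prefix and not in_suffix:
--                     hits.append((enzyme, motif_upper, start))
--                 start = dna_upper.find(motif_upper, start + 1)
--     return hits
-- ===== SOURCE B (Python) =====
-- from typing import Dict, List, Tuple
--
-- RESTRICTION_SITES: Dict[str, Tuple[str, ...]] = {
--     "BsaI": ("GGTCTC", "GAGACC"),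
--     "ScaI": ("AGTACT",),
-- }
--
-- def detect_internal_restriction_sites(dna_full: str, prefix_len: int, core_len: int) -> List[Tuple[str, str, int]]:
--     """One left-to-right pass over every position; hits land in per-(enzyme, motif)
--     buckets which are concatenated in RESTRICTION_SITES order at the end."""
--     dna_upper = dna_full.upper()
--     suffix_start = prefix_len + core_len
--     keys = [(enzyme, motif.upper()) for enzyme, motifs in RESTRICTION_SITES.items() for motif in motifs]
--     buckets = {key: [] for key in keys}
--     for i in range(len(dna_upper)):
--         for enzyme, motif in keys:
--             if dna_upper[i:i + len(motif)] == motif and not (i + len(motif) <= prefix_len) and not (i >= suffix_start):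
--                 buckets[(enzyme, motif)].append((enzyme, motif, i))
--     out = []
--     for key in keys:
--         out.extend(buckets[key])
--     return out
-- ===== Notes on version B (the rewrite author's own statement) =====
-- stated objective: alternative
-- what changed: A repeatedly calls str.find per motif in nested while-loops; B makes one left-to-right pass over every position of the uppercased DNA, testing each (enzyme, motif) window against a slice and collecting hits into per-key buckets that are concatenated in RESTRICTION_SITES order at the end.
import Mathlib
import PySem

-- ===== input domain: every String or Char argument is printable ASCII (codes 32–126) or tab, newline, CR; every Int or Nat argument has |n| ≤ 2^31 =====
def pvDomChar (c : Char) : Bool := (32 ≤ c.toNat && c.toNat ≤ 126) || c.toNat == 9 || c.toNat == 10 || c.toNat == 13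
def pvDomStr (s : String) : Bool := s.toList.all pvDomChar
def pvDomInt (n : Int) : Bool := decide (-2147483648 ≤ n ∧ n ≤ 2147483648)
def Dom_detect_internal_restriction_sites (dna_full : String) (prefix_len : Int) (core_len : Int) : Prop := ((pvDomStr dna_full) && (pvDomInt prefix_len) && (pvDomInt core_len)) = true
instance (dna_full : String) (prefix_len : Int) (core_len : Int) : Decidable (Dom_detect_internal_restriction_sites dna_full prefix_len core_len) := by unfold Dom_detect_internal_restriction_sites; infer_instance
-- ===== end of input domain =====

-- B makes one pass over every position with per-(enzyme,motif) buckets instead of A's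
-- repeated str.find while-loops; alternative decomposition, same return value (A is total).

-- ===== PORT A =====
-- RESTRICTION_SITES as an association list in insertion order
def pvRS : List (String × List String) := [("BsaI", ["GGTCTC", "GAGACC"]), ("ScaI", ["AGTACT"])]

-- the 'while start != -1' loop of A; fuel = len(dna_upper)+1 always suffices (find results strictly increase)
def pvFindLoop (dna_upper motif_upper enzyme : String) (prefix_len suffix_start : Int)
    (fuel : Nat) (start : Int) (hits : List (String × String × Int)) : List (String × String × Int) :=
  match fuel with
  | 0 => hits
  | fuel + 1 =>
    if start = -1 then hits
    else
      let endd := start + PySem.Str.len motif_upper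
      let hits' := if ¬ endd ≤ prefix_len ∧ ¬ start ≥ suffix_start
                   then hits ++ [(enzyme, motif_upper, start)] else hits
      pvFindLoop dna_upper motif_upper enzyme prefix_len suffix_start fuel
        (PySem.Str.findFrom dna_upper motif_upper (start + 1)) hits'

def detect_internal_restriction_sites (dna_full : String) (prefix_len : Int) (core_len : Int) :
    List (String × String × Int) :=
  let dna_upper := PySem.Str.upper dna_full
  let suffix_start := prefix_len + core_len
  pvRS.foldl (fun hits em =>
    em.2.foldl (fun hits motif =>
      let motif_upper := PySem.Str.upper motif
      pvFindLoop dna_upper motif_upper em.1 prefix_len suffix_start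
        (dna_upper.toList.length + 1) (PySem.Str.find dna_upper motif_upper) hits) hits) []

-- ===== PORT B =====
-- keys = [(enzyme, motif.upper()) for enzyme, motifs in RESTRICTION_SITES.items() for motif in motifs]
def pvKeys : List (String × String) :=
  pvRS.flatMap (fun em => em.2.map (fun m => (em.1, PySem.Str.upper m)))

def detect_internal_restriction_sites_alt (dna_full : String) (prefix_len : Int) (core_len : Int) :
    List (String × String × Int) :=
  let dna_upper := PySem.Str.upper dna_full
  let suffix_start := prefix_len + core_len
  -- buckets = {key: [] for key in keys}
  let buckets0 : PySem.Dict (String × String) (List (String × String × Int)) :=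
    pvKeys.foldl (fun d k => d.insert k []) PySem.Dict.empty
  -- single pass over every position, inner loop over the keys
  let buckets := (PySem.List.pyRange 0 (PySem.Str.len dna_upper) 1).foldl (fun d i =>
    pvKeys.foldl (fun d k =>
      if PySem.Str.slice dna_upper (some i) (some (i + PySem.Str.len k.2)) = k.2
          ∧ ¬ i + PySem.Str.len k.2 ≤ prefix_len ∧ ¬ i ≥ suffix_start
      then d.modify k [] (fun b => b ++ [(k.1, k.2, i)]) else d) d) buckets0
  -- concatenate the buckets in key order
  pvKeys.foldl (fun out k => out ++ buckets.getD k []) []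

-- ===== PRECONDITION & SPEC =====
def Spec_detect_internal_restriction_sites (dna_full : String) (prefix_len : Int) (core_len : Int) (out : List (String × String × Int)) : Prop := out = detect_internal_restriction_sites_alt dna_full prefix_len core_len
instance (dna_full : String) (prefix_len : Int) (core_len : Int) (out : List (String × String × Int)) : Decidable (Spec_detect_internal_restriction_sites dna_full prefix_len core_len out) := by unfold Spec_detect_internal_restriction_sites; infer_instance

-- ===== CLAIM (what is proved, stated in full; the proofs are below) =====
def Claim_equal_detect_internal_restriction_sites : Prop := ∀ (dna_full : String) (prefix_len : Int) (core_len : Int), Dom_detect_internal_restriction_sites dna_full prefix_len core_len → Spec_detect_internal_restriction_sites dna_full prefix_len core_len (detect_internal_restriction_sites dna_full prefix_len core_len)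

-- ===== LEMMAS AND PROOFS =====

-- the common canonical value of one (enzyme, motif) bucket: the matching positions in [k, n)
def pvHitsFrom (s mu : List Char) (enzyme ms : String) (pl ss : Int) (k : Nat) :
    List (String × String × Int) :=
  ((List.range' k (s.length - k)).filter
      (fun i => PySem.Chars.startswith (List.drop i s) mu
         && (decide (¬ ((i : Int) + (mu.length : Int) ≤ pl)) && decide (¬ ((i : Int) ≥ ss)))))
    |>.map (fun (i : Nat) => (enzyme, ms, (i : Int)))

-- getD at a key outside the fold's key list is unchanged
theorem pvL1 {kappa nu : Type} [BEq kappa] [LawfulBEq kappa] (P : kappa → Prop) [DecidablePred P]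
    (v : kappa → nu) (ks : List kappa) (c : kappa) (hc : c ∉ ks) (d : PySem.Dict kappa (List nu)) :
    (ks.foldl (fun d k => if P k then d.modify k [] (fun b => b ++ [v k]) else d) d).getD c []
      = d.getD c [] := by
  induction ks generalizing d with
  | nil => rfl
  | cons k t ih =>
    have hck : c ≠ k := fun h => hc (h ▸ List.mem_cons_self)
    have hct : c ∉ t := fun h => hc (List.mem_cons_of_mem _ h)
    simp only [List.foldl_cons]
    by_cases h : P k
    · rw [if_pos h, ih hct, PySem.Dict.getD_modify_of_ne _ _ _ hck]
    · rw [if_neg h, ih hct]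

-- getD at a key of a Nodup key list after one pass: append the hit iff the condition holds
theorem pvL2 {kappa nu : Type} [BEq kappa] [LawfulBEq kappa] (P : kappa → Prop) [DecidablePred P]
    (v : kappa → nu) (ks : List kappa) (c : kappa) (hc : c ∈ ks) (hn : ks.Nodup)
    (d : PySem.Dict kappa (List nu)) :
    (ks.foldl (fun d k => if P k then d.modify k [] (fun b => b ++ [v k]) else d) d).getD c []
      = d.getD c [] ++ (if P c then [v c] else []) := by
  induction ks generalizing d with
  | nil => cases hc
  | cons k t ih =>
    rcases List.mem_cons.1 hc with rfl | hct
    · have hct : c ∉ t := (List.nodup_cons.1 hn).1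
      simp only [List.foldl_cons]
      by_cases h : P c
      · rw [if_pos h, if_pos h, pvL1 P v t c hct, PySem.Dict.getD_modify_self]
      · rw [if_neg h, if_neg h, pvL1 P v t c hct, List.append_nil]
    · have hck : c ≠ k := fun h =>
        (List.nodup_cons.1 hn).1 (h ▸ hct)
      simp only [List.foldl_cons]
      by_cases h : P k
      · rw [if_pos h, ih hct (List.nodup_cons.1 hn).2,
            PySem.Dict.getD_modify_of_ne _ _ _ hck]
      · rw [if_neg h, ih hct (List.nodup_cons.1 hn).2]

-- getD at a key after the whole position pass: the bucket is the filtered, mapped position list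
theorem pvL3 {alpha kappa nu : Type} [BEq kappa] [LawfulBEq kappa]
    (P : alpha → kappa → Prop) [inst : ∀ a k, Decidable (P a k)] (v : alpha → kappa → nu)
    (l : List alpha) (ks : List kappa) (c : kappa) (hc : c ∈ ks) (hn : ks.Nodup)
    (d : PySem.Dict kappa (List nu)) :
    (l.foldl (fun d a =>
        ks.foldl (fun d k => if P a k then d.modify k [] (fun b => b ++ [v a k]) else d) d) d).getD c []
      = d.getD c [] ++ (l.filter (fun a => decide (P a c))).map (fun a => v a c) := by
  induction l generalizing d with
  | nil => simp
  | cons a t ih =>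
    simp only [List.foldl_cons, List.filter_cons]
    rw [ih, pvL2 (P a) (v a) ks c hc hn]
    by_cases h : P a c
    · simp [h]
    · simp [h]

theorem pvFindLoop_eq (du mu enzyme : String) (pl ss : Int) (hmu : mu.toList ≠ []) :
    ∀ (fuel k : Nat) (acc : List (String × String × Int)),
      k ≤ du.toList.length → du.toList.length + 1 - k ≤ fuel →
      pvFindLoop du mu enzyme pl ss fuel (PySem.Chars.findFrom du.toList mu.toList (k : Int)) acc
        = acc ++ pvHitsFrom du.toList mu.toList enzyme mu pl ss k := by
  intro fuel
  induction fuel with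
  | zero => intro k acc hk hf; omega
  | succ fuel ih =>
    intro k acc hk hf
    by_cases h1 : PySem.Chars.findFrom du.toList mu.toList (k : Int) = -1
    · -- no further match: the loop stops and the bucket from k is empty
      have hno : ¬ mu.toList <:+: List.drop k du.toList :=
        (PySem.Chars.findFrom_natCast_eq_neg_one_iff du.toList mu.toList k hk).1 h1
      have hempty : pvHitsFrom du.toList mu.toList enzyme mu pl ss k = [] := by
        unfold pvHitsFrom
        rw [List.filter_eq_nil_iff.2, List.map_nil]
        intro i hi
        obtain ⟨hki, _⟩ := List.mem_range'_1.1 hi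
        simp only [Bool.and_eq_true, not_and]
        intro hsw _ _
        have hp : mu.toList <+: List.drop i du.toList :=
          (PySem.Chars.startswith_iff _ _).1 hsw
        have hdd : List.drop i du.toList = List.drop (i - k) (List.drop k du.toList) := by
          rw [List.drop_drop]; congr 1; omega
        exact hno ((hdd ▸ hp).isInfix.trans (List.drop_suffix (i - k) _).isInfix)
      simp [pvFindLoop, h1, hempty]
    · obtain ⟨hkm, hpre, hmin⟩ :=
        PySem.Chars.findFrom_natCast_spec du.toList mu.toList k hk h1
      set m := PySem.Chars.findFrom du.toList mu.toList (k : Int) with hmdef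
      have hm0 : 0 ≤ m := le_trans (by exact_mod_cast Nat.zero_le k) hkm
      have hmM : m = (m.toNat : Int) := (Int.toNat_of_nonneg hm0).symm
      have hkM : k ≤ m.toNat := by omega
      have hMn : m.toNat < du.toList.length := by
        by_contra hcon
        rw [List.drop_eq_nil_of_le (by omega)] at hpre
        exact hmu (List.prefix_nil.1 hpre)
      -- one loop iteration
      have hstep : pvFindLoop du mu enzyme pl ss (fuel + 1) m acc
          = pvFindLoop du mu enzyme pl ss fuel
              (PySem.Str.findFrom du mu (m + 1))
              (if ¬ m + PySem.Str.len mu ≤ pl ∧ ¬ m ≥ ss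
               then acc ++ [(enzyme, mu, m)] else acc) := by
        rw [pvFindLoop, if_neg h1]
      rw [hstep]
      have hnext : PySem.Str.findFrom du mu (m + 1)
          = PySem.Chars.findFrom du.toList mu.toList ((m.toNat + 1 : Nat) : Int) := by
        rw [PySem.Str.findFrom_eq]; congr 1; omega
      rw [hnext, ih (m.toNat + 1) _ (by omega) (by omega)]
      -- split the bucket from k at the first hit m
      have hsplit : List.range' k (du.toList.length - k)
          = List.range' k (m.toNat - k) ++ m.toNat ::
              List.range' (m.toNat + 1) (du.toList.length - (m.toNat + 1)) := by
        have h3 := @List.range'_append k (m.toNat - k) (du.toList.length - m.toNat) 1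
        have h4 : k + 1 * (m.toNat - k) = m.toNat := by omega
        have h5 : m.toNat - k + (du.toList.length - m.toNat) = du.toList.length - k := by omega
        have h6 : du.toList.length - m.toNat = (du.toList.length - (m.toNat + 1)) + 1 := by omega
        rw [h4, h5] at h3
        rw [← h3, h6, List.range'_succ]
      have hfirst : (List.range' k (m.toNat - k)).filter
          (fun i => PySem.Chars.startswith (List.drop i du.toList) mu.toList
             && (decide (¬ ((i : Int) + (mu.toList.length : Int) ≤ pl))
                 && decide (¬ ((i : Int) ≥ ss)))) = [] := by
        rw [List.filter_eq_nil_iff]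
        intro i hi
        obtain ⟨h4, h5⟩ := List.mem_range'_1.1 hi
        simp only [Bool.and_eq_true, not_and]
        intro hsw _ _
        exact hmin i h4 (by omega) ((PySem.Chars.startswith_iff _ _).1 hsw)
      have hswm : PySem.Chars.startswith (List.drop m.toNat du.toList) mu.toList = true :=
        (PySem.Chars.startswith_iff _ _).2 hpre
      -- combine
      unfold pvHitsFrom
      rw [hsplit, List.filter_append, hfirst, List.nil_append, List.filter_cons, hswm]
      by_cases hkeep : ¬ m + PySem.Str.len mu ≤ pl ∧ ¬ m ≥ ss
      · have hb : (decide (¬ ((m.toNat : Int) + (mu.toList.length : Int) ≤ pl))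
            && decide (¬ ((m.toNat : Int) ≥ ss))) = true := by
          rw [PySem.Str.len_eq] at hkeep
          simp only [Bool.and_eq_true, decide_eq_true_eq]
          exact ⟨by rw [← hmM]; exact hkeep.1, by rw [← hmM]; exact hkeep.2⟩
        rw [if_pos hkeep, Bool.true_and, hb, if_pos rfl, List.map_cons,
            List.append_assoc, List.singleton_append, hmM]
        simp only [Int.toNat_natCast]
      · have hb : (decide (¬ ((m.toNat : Int) + (mu.toList.length : Int) ≤ pl))
            && decide (¬ ((m.toNat : Int) ≥ ss))) = false := by
          rw [PySem.Str.len_eq] at hkeep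
          rw [← hmM]
          simp only [Bool.and_eq_false_iff, decide_eq_false_iff_not, not_not]
          tauto
        rw [if_neg hkeep, Bool.true_and, hb, if_neg (by simp)]

-- the B-side bucket characterisation
theorem pvBucket_eq (du : String) (pl ss : Int) (c : String × String) (hc : c ∈ pvKeys) :
    ((PySem.List.pyRange 0 (PySem.Str.len du) 1).foldl (fun d i =>
        pvKeys.foldl (fun d k =>
          if PySem.Str.slice du (some i) (some (i + PySem.Str.len k.2)) = k.2
              ∧ ¬ i + PySem.Str.len k.2 ≤ pl ∧ ¬ i ≥ ss
          then d.modify k [] (fun b => b ++ [(k.1, k.2, i)]) else d) d)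
        (pvKeys.foldl (fun d k => d.insert k []) PySem.Dict.empty)).getD c []
      = pvHitsFrom du.toList c.2.toList c.1 c.2 pl ss 0 := by
  rw [pvL3 (fun (i : Int) (k : String × String) =>
        PySem.Str.slice du (some i) (some (i + PySem.Str.len k.2)) = k.2
          ∧ ¬ i + PySem.Str.len k.2 ≤ pl ∧ ¬ i ≥ ss)
      (fun i k => (k.1, k.2, i)) _ pvKeys c hc (by decide)]
  have h0 : (pvKeys.foldl (fun d k => d.insert k []) PySem.Dict.empty).getD c
      ([] : List (String × String × Int)) = [] := by
    fin_cases hc <;> decide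
  rw [h0, List.nil_append]
  -- move to Nat positions
  simp only [PySem.Str.len_eq]
  rw [PySem.List.pyRange_zero_natCast, List.filter_map, List.map_map]
  unfold pvHitsFrom
  rw [Nat.sub_zero, ← List.range_eq_range']
  congr 1
  apply List.filter_congr
  intro j hj
  simp only [Function.comp]
  rw [Bool.eq_iff_iff]
  have hsl : PySem.Str.slice du (some (j : Int)) (some ((j : Int) + (c.2.toList.length : Int))) = c.2
      ↔ c.2.toList <+: List.drop j du.toList := by
    rw [← String.toList_inj, PySem.Str.toList_slice, PySem.Chars.slice_eq_listSlice,
        PySem.List.slice_natCast_add, List.prefix_iff_eq_take]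
    constructor
    · intro h; exact h.symm
    · intro h; exact h.symm
  simp only [decide_eq_true_eq, Bool.and_eq_true]
  rw [hsl, ← PySem.Chars.startswith_iff]

-- ===== VERDICT (by name: the statement is the Claim_ definition above) =====
theorem detect_internal_restriction_sites_spec : Claim_equal_detect_internal_restriction_sites := by
  intro dna_full prefix_len core_len _
  unfold Spec_detect_internal_restriction_sites
  unfold detect_internal_restriction_sites detect_internal_restriction_sites_alt
  simp only []
  have hkeys : pvKeys = [("BsaI", "GGTCTC"), ("BsaI", "GAGACC"), ("ScaI", "AGTACT")] := by decide
  set du := PySem.Str.upper dna_full with hdu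
  set ss := prefix_len + core_len with hss
  -- A side: three find-loops, each one bucket
  have hA : ∀ (m e : String) (acc : List (String × String × Int)), m.toList ≠ [] →
      pvFindLoop du m e prefix_len ss (du.toList.length + 1) (PySem.Str.find du m) acc
        = acc ++ pvHitsFrom du.toList m.toList e m prefix_len ss 0 := by
    intro m e acc hm
    have h5 : PySem.Str.find du m
        = PySem.Chars.findFrom du.toList m.toList ((0 : Nat) : Int) := by
      rw [PySem.Str.find_eq, Nat.cast_zero, PySem.Chars.findFrom_zero]
    rw [h5, pvFindLoop_eq du m e prefix_len ss hm (du.toList.length + 1) 0 acc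
      (Nat.zero_le _) (by omega)]
  -- B side: the final concatenation loop over the three keys
  have hB : ∀ d : PySem.Dict (String × String) (List (String × String × Int)),
      pvKeys.foldl (fun out k => out ++ d.getD k []) []
        = d.getD ("BsaI", "GGTCTC") [] ++ d.getD ("BsaI", "GAGACC") []
            ++ d.getD ("ScaI", "AGTACT") [] := by
    intro d; rw [hkeys]; simp [List.foldl]
  rw [hB]
  rw [pvBucket_eq du prefix_len ss ("BsaI", "GGTCTC") (by decide),
      pvBucket_eq du prefix_len ss ("BsaI", "GAGACC") (by decide),
      pvBucket_eq du prefix_len ss ("ScaI", "AGTACT") (by decide)]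
  simp only [pvRS, List.foldl]
  have hu1 : PySem.Str.upper "GGTCTC" = "GGTCTC" := by decide
  have hu2 : PySem.Str.upper "GAGACC" = "GAGACC" := by decide
  have hu3 : PySem.Str.upper "AGTACT" = "AGTACT" := by decide
  rw [hu1, hu2, hu3,
      hA "GGTCTC" "BsaI" [] (by decide),
      hA "GAGACC" "BsaI" _ (by decide),
      hA "AGTACT" "ScaI" _ (by decide)]
  simp [List.append_assoc]
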